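-- pv_equiv track=rewrite | github.com/MysticalFire1315/NCSS-Challenge-Solutions | 2021_Jul_Advanced/week_4/pac_man_i/program.py | move_ghosts
-- ===== SOURCE A (Python) =====
-- def move_ghosts(board, ghost_paths):
--   new_board = []
--   ghost_position = [path[0] for path in ghost_paths]
--   ghost_moves = [path[1] for path in ghost_paths]
--
--   for row in range(len(board)):
--     current_row = ''
--     for column in range(len(board[row])):
--       # Check if the square is where any of those currently is
--       if tuple([row, column]) in ghost_position:
--         current_row += ' '
--       elif tuple([row, column]) in ghost_moves:
--         current_row += 'G'
--       else:
--         current_row += board[row][column]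
--     new_board.append(current_row)
--   return new_board
-- ===== SOURCE B (Python) =====
-- def move_ghosts(board, ghost_paths):
--   grid = [list(row) for row in board]
--
--   def stamp(cell, ch):
--     r, c = cell
--     if 0 <= r < len(grid) and 0 <= c < len(grid[r]):
--       grid[r][c] = ch
--
--   for path in ghost_paths:
--     stamp(path[1], 'G')
--   for path in ghost_paths:
--     stamp(path[0], ' ')
--   return [''.join(row) for row in grid]
-- ===== Notes on version B (the rewrite author's own statement) =====
-- stated objective: faster
-- what changed: Instead of testing every board cell for membership in the ghost position/move lists, B copies the board into character lists once and stamps 'G' at each move then ' ' at each position (positions override moves), skipping off-grid cells.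
import Mathlib
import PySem

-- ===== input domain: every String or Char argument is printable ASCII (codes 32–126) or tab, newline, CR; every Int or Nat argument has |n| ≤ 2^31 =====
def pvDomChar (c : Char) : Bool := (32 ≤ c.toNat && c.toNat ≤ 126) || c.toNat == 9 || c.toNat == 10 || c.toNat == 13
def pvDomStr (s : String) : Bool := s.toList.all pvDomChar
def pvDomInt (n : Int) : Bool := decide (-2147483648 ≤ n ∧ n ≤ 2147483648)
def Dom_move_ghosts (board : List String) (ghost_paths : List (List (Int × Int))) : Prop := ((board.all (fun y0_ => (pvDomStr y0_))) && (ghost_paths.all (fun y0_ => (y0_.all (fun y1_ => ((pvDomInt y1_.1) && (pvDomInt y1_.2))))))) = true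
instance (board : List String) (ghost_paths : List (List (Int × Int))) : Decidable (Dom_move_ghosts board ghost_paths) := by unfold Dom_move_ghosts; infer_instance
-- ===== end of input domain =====

-- B replaces A's per-cell membership scans over the ghost lists by one board copy plus one stamping pass per ghost (moves 'G' first, then positions ' ', so positions win), skipping off-grid cells.


-- ===== PORT A =====
def move_ghosts (board : List String) (ghost_paths : List (List (Int × Int))) : List String :=
  let ghost_position := ghost_paths.map (fun p => p.headD (0, 0))
  let ghost_moves := ghost_paths.map (fun p => (p.drop 1).headD (0, 0))
  (List.range board.length).map (fun (row : Nat) =>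
    let rowChars := (board.getD row "").toList
    String.mk ((List.range rowChars.length).map (fun (column : Nat) =>
      if ((row : Int), (column : Int)) ∈ ghost_position then ' '
      else if ((row : Int), (column : Int)) ∈ ghost_moves then 'G'
      else rowChars.getD column ' ')))

-- ===== PORT B =====
-- writes ch at cell if it is on the grid, else leaves the grid unchanged
def pvStamp (g : List (List Char)) (cell : Int × Int) (ch : Char) : List (List Char) :=
  if 0 ≤ cell.1 ∧ cell.1 < (g.length : Int) ∧ 0 ≤ cell.2 ∧ cell.2 < ((g.getD cell.1.toNat []).length : Int) then
    g.set cell.1.toNat ((g.getD cell.1.toNat []).set cell.2.toNat ch)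
  else g

def move_ghosts_alt (board : List String) (ghost_paths : List (List (Int × Int))) : List String :=
  let g0 := board.map String.toList
  let g1 := ghost_paths.foldl (fun g p => pvStamp g ((p.drop 1).headD (0, 0)) 'G') g0
  let g2 := ghost_paths.foldl (fun g p => pvStamp g (p.headD (0, 0)) ' ') g1
  g2.map String.mk

-- ===== PRECONDITION & SPEC =====
-- Pre_ excludes exactly the inputs with a ghost path of fewer than two cells, on which A raises IndexError (path[0]/path[1]).
def Pre_move_ghosts (board : List String) (ghost_paths : List (List (Int × Int))) : Prop :=
  ∀ p ∈ ghost_paths, 2 ≤ p.length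
instance (board : List String) (ghost_paths : List (List (Int × Int))) : Decidable (Pre_move_ghosts board ghost_paths) := by unfold Pre_move_ghosts; infer_instance
def pvWitness_move_ghosts : List String × (List (List (Int × Int))) := (["###", "# ."], [[(1, 1), (1, 2)]])

def Spec_move_ghosts (board : List String) (ghost_paths : List (List (Int × Int))) (out : List String) : Prop := out = move_ghosts_alt board ghost_paths
instance (board : List String) (ghost_paths : List (List (Int × Int))) (out : List String) : Decidable (Spec_move_ghosts board ghost_paths out) := by unfold Spec_move_ghosts; infer_instance

-- ===== CLAIM (what is proved, stated in full; the proofs are below) =====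
def Claim_equal_move_ghosts : Prop := ∀ (board : List String) (ghost_paths : List (List (Int × Int))), Dom_move_ghosts board ghost_paths → Pre_move_ghosts board ghost_paths → Spec_move_ghosts board ghost_paths (move_ghosts board ghost_paths)

-- ===== LEMMAS AND PROOFS =====


theorem length_pvStamp (g : List (List Char)) (cell : Int × Int) (ch : Char) :
    (pvStamp g cell ch).length = g.length := by
  unfold pvStamp; split <;> simp

theorem rowlen_pvStamp (g : List (List Char)) (cell : Int × Int) (ch : Char) (r : Nat) :
    ((pvStamp g cell ch).getD r []).length = (g.getD r []).length := by
  unfold pvStamp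
  split
  · next hin =>
    by_cases h : cell.1.toNat = r
    · subst h
      have hb : cell.1.toNat < g.length := by omega
      simp only [List.getD]
      rw [List.getElem?_set_self hb, Option.getD_some, List.length_set]
    · simp only [List.getD]
      rw [List.getElem?_set_ne h]
  · rfl

theorem getD_pvStamp (g : List (List Char)) (cell : Int × Int) (ch : Char) (r c : Nat) :
    ((pvStamp g cell ch).getD r []).getD c ' ' =
      if cell = ((r : Int), (c : Int)) ∧ r < g.length ∧ c < (g.getD r []).length then ch
      else (g.getD r []).getD c ' ' := by
  unfold pvStamp
  split
  · next hin =>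
    by_cases hrr : cell.1.toNat = r
    · by_cases hcc : cell.2.toNat = c
      · have hcell : cell = ((r : Int), (c : Int)) := by
          obtain ⟨a, b⟩ := cell
          simp only [Prod.mk.injEq]
          constructor <;> simp_all <;> omega
        have hrl : r < g.length := by omega
        have hcl : c < (g.getD r []).length := by
          subst hrr hcc
          omega
        rw [if_pos ⟨hcell, hrl, hcl⟩]
        subst hrr hcc
        simp only [List.getD]
        rw [List.getElem?_set_self (by omega), Option.getD_some,
            List.getElem?_set_self (by simpa [List.getD] using hcl), Option.getD_some]
      · have hne : ¬ (cell = ((r : Int), (c : Int)) ∧ r < g.length ∧ c < (g.getD r []).length) := by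
          rintro ⟨rfl, -, -⟩; simp at hcc
        rw [if_neg hne]
        subst hrr
        simp only [List.getD]
        rw [List.getElem?_set_self (by omega), Option.getD_some, List.getElem?_set_ne hcc]
    · have hne : ¬ (cell = ((r : Int), (c : Int)) ∧ r < g.length ∧ c < (g.getD r []).length) := by
        rintro ⟨rfl, -, -⟩; simp at hrr
      rw [if_neg hne]
      simp only [List.getD]
      rw [List.getElem?_set_ne hrr]
  · next hout =>
    split
    · next hc =>
      exfalso
      obtain ⟨rfl, hrl, hcl⟩ := hc
      refine hout ⟨Int.natCast_nonneg r, ?_, Int.natCast_nonneg c, ?_⟩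
      · show (r : Int) < (g.length : Int)
        exact_mod_cast hrl
      · show (c : Int) < ((g.getD ((r : Int), (c : Int)).1.toNat []).length : Int)
        simp only [Int.toNat_natCast]
        exact_mod_cast hcl
    · rfl

theorem fold_pvStamp_length (cells : List (Int × Int)) (ch : Char) (g : List (List Char)) :
    (cells.foldl (fun g cl => pvStamp g cl ch) g).length = g.length := by
  induction cells generalizing g with
  | nil => rfl
  | cons h t ih => simp only [List.foldl_cons]; rw [ih, length_pvStamp]

theorem fold_pvStamp_rowlen (cells : List (Int × Int)) (ch : Char) (g : List (List Char)) (r : Nat) :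
    ((cells.foldl (fun g cl => pvStamp g cl ch) g).getD r []).length = (g.getD r []).length := by
  induction cells generalizing g with
  | nil => rfl
  | cons h t ih => simp only [List.foldl_cons]; rw [ih, rowlen_pvStamp]

theorem fold_pvStamp_getD (cells : List (Int × Int)) (ch : Char) (g : List (List Char)) (r c : Nat)
    (hr : r < g.length) (hc : c < (g.getD r []).length) :
    ((cells.foldl (fun g cl => pvStamp g cl ch) g).getD r []).getD c ' ' =
      if ((r : Int), (c : Int)) ∈ cells then ch else (g.getD r []).getD c ' ' := by
  induction cells generalizing g with
  | nil => simp
  | cons hd t ih =>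
    simp only [List.foldl_cons]
    rw [ih _ ((length_pvStamp g hd ch).symm ▸ hr) ((rowlen_pvStamp g hd ch r).symm ▸ hc)]
    rw [getD_pvStamp]
    by_cases hmem : ((r : Int), (c : Int)) ∈ t
    · simp [hmem]
    · rw [if_neg hmem]
      by_cases heq : hd = ((r : Int), (c : Int))
      · rw [if_pos ⟨heq, hr, hc⟩, if_pos (List.mem_cons.mpr (Or.inl heq.symm))]
      · have hnot : ((r : Int), (c : Int)) ∉ hd :: t := by
          simp only [List.mem_cons]
          rintro (h | h)
          · exact heq h.symm
          · exact hmem h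
        rw [if_neg (fun hcond => heq hcond.1), if_neg hnot]

-- ===== VERDICT (by name: the statement is the Claim_ definition above) =====
theorem move_ghosts_spec : Claim_equal_move_ghosts := by
  intro board gp _ _
  simp only [Spec_move_ghosts, move_ghosts, move_ghosts_alt]
  rw [← List.foldl_map (f := fun p => ((p : List (Int × Int)).drop 1).headD ((0:Int), (0:Int)))
        (g := fun g cl => pvStamp g cl 'G'),
      ← List.foldl_map (f := fun p => (p : List (Int × Int)).headD ((0:Int), (0:Int)))
        (g := fun g cl => pvStamp g cl ' ')]
  set pos := gp.map (fun p => p.headD ((0:Int), (0:Int))) with hpos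
  set mov := gp.map (fun p => (p.drop 1).headD ((0:Int), (0:Int))) with hmov
  set g0 := board.map String.toList with hg0
  set g1 := mov.foldl (fun g cl => pvStamp g cl 'G') g0 with hg1
  set g2 := pos.foldl (fun g cl => pvStamp g cl ' ') g1 with hg2
  have hlen0 : g0.length = board.length := by rw [hg0, List.length_map]
  have hlen1 : g1.length = board.length := by rw [hg1, fold_pvStamp_length, hlen0]
  have hlen2 : g2.length = board.length := by rw [hg2, fold_pvStamp_length, hlen1]
  have hrow0 : ∀ r : Nat, g0.getD r [] = (board.getD r "").toList := by
    intro r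
    rw [hg0]
    simp only [List.getD, List.getElem?_map]
    cases board[r]? <;> simp
  have hrow1 : ∀ r : Nat, (g1.getD r []).length = (board.getD r "").toList.length := by
    intro r; rw [hg1, fold_pvStamp_rowlen, hrow0]
  have hrow2 : ∀ r : Nat, (g2.getD r []).length = (board.getD r "").toList.length := by
    intro r; rw [hg2, fold_pvStamp_rowlen, hrow1]
  have key : ∀ r : Nat, r < board.length →
      g2.getD r [] = (List.range (board.getD r "").toList.length).map
        (fun c : Nat => if ((r : Int), (c : Int)) ∈ pos then ' '
                  else if ((r : Int), (c : Int)) ∈ mov then 'G'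
                  else (board.getD r "").toList.getD c ' ') := by
    intro r hrb
    apply List.ext_getElem
    · rw [hrow2]; simp
    · intro c hc1 hc2
      have hcb : c < (board.getD r "").toList.length := by rw [← hrow2 r]; exact hc1
      rw [← List.getD_eq_getElem (g2.getD r []) ' ' hc1]
      rw [hg2, fold_pvStamp_getD pos ' ' g1 r c (by rw [hlen1]; exact hrb) (by rw [hrow1]; exact hcb)]
      rw [hg1, fold_pvStamp_getD mov 'G' g0 r c (by rw [hlen0]; exact hrb) (by rw [hrow0]; exact hcb)]
      rw [hrow0]
      simp
  apply List.ext_getElem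
  · rw [List.length_map, List.length_map, List.length_range, hlen2]
  · intro r h1 h2
    have hrb : r < board.length := by simpa using h1
    simp only [List.getElem_map, List.getElem_range]
    rw [← List.getD_eq_getElem g2 [] (by rw [hlen2]; exact hrb), key r hrb]
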